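-- pv_equiv track=rewrite | github.com/DoubleJONY/KDJ-algorithm-challenge | minsoo/graph/num_of_rooms.py | solution
-- ===== SOURCE A (Python) =====
-- from collections import defaultdict, deque
--
-- def solution(arrows):
--     dp = [(-1, 0), (-1, 1), (0, 1), (1, 1), (1, 0), (1, -1), (0, -1), (-1, -1)]
--
--     q = deque([(0, 0)])
--     for d in arrows:
--         for _ in range(2):
--             x, y = q[-1]
--             dx, dy = dp[d]
--             q.append((x + dx, y + dy))
--
--     visited = defaultdict(lambda: False)
--     visited_from = defaultdict(set)
--     cnt = 0
--
--     prev = q.popleft()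
--     visited[prev] = True
--     while q:
--         curr = q.popleft()
--         if visited[curr]:
--             if prev not in visited_from[curr]:
--                 cnt += 1
--         else:
--             visited[curr] = True
--
--         visited_from[curr].add(prev)
--         visited_from[prev].add(curr)
--
--         prev = curr
--
--     return cnt
-- ===== SOURCE B (Python) =====
-- def solution(arrows):
--     dp = [(-1, 0), (-1, 1), (0, 1), (1, 1), (1, 0), (1, -1), (0, -1), (-1, -1)]
--
--     # scan: materialise the doubled delta sequence, then prefix-sum the positions
--     deltas = [dp[d] for d in arrows for _ in range(2)]
--     pts = [(0, 0)]
--     x = y = 0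
--     for dx, dy in deltas:
--         x += dx
--         y += dy
--         pts.append((x, y))
--
--     # Euler's formula on the connected traced graph: bounded faces = E - V + 1
--     vertices = set(pts)
--     edges = set()
--     for a, b in zip(pts, pts[1:]):
--         edges.add((a, b) if a <= b else (b, a))
--     return len(edges) - len(vertices) + 1
-- ===== Notes on version B (the rewrite author's own statement) =====
-- stated objective: simpler
-- what changed: B replaces A's incremental revisited-edge cycle detection (visited set + symmetric visited_from adjacency dict maintained along the walk) with a direct Euler-formula count: collect the distinct vertices and distinct undirected edges of the traced path and return |E| - |V| + 1, which equals the number of closed rooms since the traced graph is connected.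
import Mathlib
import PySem

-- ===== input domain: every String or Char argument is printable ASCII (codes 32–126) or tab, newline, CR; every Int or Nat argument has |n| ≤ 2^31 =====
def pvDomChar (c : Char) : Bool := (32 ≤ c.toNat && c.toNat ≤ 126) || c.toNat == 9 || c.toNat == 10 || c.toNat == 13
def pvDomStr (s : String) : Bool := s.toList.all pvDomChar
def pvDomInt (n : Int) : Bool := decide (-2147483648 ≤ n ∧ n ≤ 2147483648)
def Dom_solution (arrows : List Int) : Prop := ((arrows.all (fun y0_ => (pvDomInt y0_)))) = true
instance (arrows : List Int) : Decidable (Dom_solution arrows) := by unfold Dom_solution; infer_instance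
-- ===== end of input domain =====

-- B replaces A's incremental revisited-edge cycle counting with Euler's formula |E| - |V| + 1
-- on the (always connected) traced graph; same doubled point sequence, built by a prefix-sum scan.

-- ===== PORT A =====
def pvDp : List (Int × Int) :=
  [(-1, 0), (-1, 1), (0, 1), (1, 1), (1, 0), (1, -1), (0, -1), (-1, -1)]

-- inner 'for _ in range(2)' body run twice: x, y = q[-1]; dx, dy = dp[d]; q.append(...)
def pvStepA (q : List (Int × Int)) (d : Int) : List (Int × Int) :=
  let p1 := (PySem.List.pyGet? q (-1)).getD (0, 0)
  let d1 := (PySem.List.pyGet? pvDp d).getD (0, 0)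
  let q1 := q ++ [(p1.1 + d1.1, p1.2 + d1.2)]
  let p2 := (PySem.List.pyGet? q1 (-1)).getD (0, 0)
  let d2 := (PySem.List.pyGet? pvDp d).getD (0, 0)
  q1 ++ [(p2.1 + d2.1, p2.2 + d2.2)]

def pvBuildA (arrows : List Int) : List (Int × Int) :=
  arrows.foldl pvStepA [(0, 0)]

-- A's while loop: visited (defaultdict used as a set), visited_from (defaultdict of sets), count
def pvLoopA : List (Int × Int) → PySem.Set (Int × Int) →
    PySem.Dict (Int × Int) (PySem.Set (Int × Int)) → Int → (Int × Int) → Int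
  | [], _, _, cnt, _ => cnt
  | curr :: rest, visited, vfrom, cnt, prev =>
    let cnt' := if curr ∈ visited then
        (if prev ∈ vfrom.getD curr PySem.Set.empty then cnt else cnt + 1)
      else cnt
    let visited' := if curr ∈ visited then visited else PySem.Set.add visited curr
    let f1 := vfrom.insert curr (PySem.Set.add (vfrom.getD curr PySem.Set.empty) prev)
    let f2 := f1.insert prev (PySem.Set.add (f1.getD prev PySem.Set.empty) curr)
    pvLoopA rest visited' f2 cnt' curr

def solution (arrows : List Int) : Int :=
  match pvBuildA arrows with
  | [] => 0  -- unreachable: the deque starts with (0,0)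
  | p :: rest => pvLoopA rest (PySem.Set.add PySem.Set.empty p) PySem.Dict.empty 0 p

-- ===== PORT B =====
-- doubled delta sequence: [dp[d] for d in arrows for _ in range(2)]
def pvDeltas (arrows : List Int) : List (Int × Int) :=
  arrows.flatMap (fun d =>
    let dd := (PySem.List.pyGet? pvDp d).getD (0, 0)
    [dd, dd])

-- prefix-sum scan of the deltas from (0,0)
def pvScan : List (Int × Int) → Int → Int → List (Int × Int)
  | [], _, _ => []
  | dd :: rest, x, y => (x + dd.1, y + dd.2) :: pvScan rest (x + dd.1) (y + dd.2)

def pvPts (arrows : List Int) : List (Int × Int) :=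
  (0, 0) :: pvScan (pvDeltas arrows) 0 0

-- undirected edge, canonically ordered: (a, b) if a <= b else (b, a)  (tuple lex order)
def pvNorm (a b : Int × Int) : (Int × Int) × (Int × Int) :=
  if a.1 < b.1 ∨ (a.1 = b.1 ∧ a.2 ≤ b.2) then (a, b) else (b, a)

def pvEdgeSet (pts : List (Int × Int)) : PySem.Set ((Int × Int) × (Int × Int)) :=
  (pts.zip pts.tail).foldl (fun E ab => PySem.Set.add E (pvNorm ab.1 ab.2)) PySem.Set.empty

def solution_alt (arrows : List Int) : Int :=
  let pts := pvPts arrows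
  let vertices := PySem.Set.ofList pts
  let edges := pvEdgeSet pts
  (PySem.Set.len edges : Int) - (PySem.Set.len vertices : Int) + 1

-- ===== PRECONDITION & SPEC =====
-- Pre_ excludes arrows with an entry outside -8..7, on which dp[d] raises IndexError in both A and B.
def Pre_solution (arrows : List Int) : Prop := ∀ d ∈ arrows, -8 ≤ d ∧ d < 8
instance (arrows : List Int) : Decidable (Pre_solution arrows) := by
  unfold Pre_solution; infer_instance

def pvWitness_solution : List Int := [6, 6, 4, 4, 2, 2, 0, 0]

def Spec_solution (arrows : List Int) (out : Int) : Prop := out = solution_alt arrows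
instance (arrows : List Int) (out : Int) : Decidable (Spec_solution arrows out) := by
  unfold Spec_solution; infer_instance

-- ===== CLAIM (what is proved, stated in full; the proofs are below) =====
def Claim_equal_solution : Prop :=
  ∀ (arrows : List Int), Dom_solution arrows → Pre_solution arrows →
    Spec_solution arrows (solution arrows)

-- ===== LEMMAS AND PROOFS =====

-- recursive form of B's edge fold, matching A's walk
def pvEdgeFold (E : PySem.Set ((Int × Int) × (Int × Int))) :
    (Int × Int) → List (Int × Int) → PySem.Set ((Int × Int) × (Int × Int))
  | _, [] => E
  | prev, c :: r => pvEdgeFold (PySem.Set.add E (pvNorm prev c)) c r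

theorem pvEdgeSet_eq_fold : ∀ (rest : List (Int × Int)) (prev : Int × Int)
    (E : PySem.Set ((Int × Int) × (Int × Int))),
    ((prev :: rest).zip rest).foldl (fun E ab => PySem.Set.add E (pvNorm ab.1 ab.2)) E =
      pvEdgeFold E prev rest := by
  intro rest
  induction rest with
  | nil => intro prev E; rfl
  | cons c r ih => intro prev E; simpa [pvEdgeFold, List.zip] using ih c _

theorem pvNorm_comm (a b : Int × Int) : pvNorm a b = pvNorm b a := by
  obtain ⟨a1, a2⟩ := a; obtain ⟨b1, b2⟩ := b
  simp only [pvNorm]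
  split_ifs with h1 h2 h2 <;> simp only [Prod.mk.injEq] <;> omega

theorem pvNorm_inj (a b c d : Int × Int) :
    pvNorm a b = pvNorm c d ↔ ((a = c ∧ b = d) ∨ (a = d ∧ b = c)) := by
  constructor
  · intro h
    unfold pvNorm at h
    split_ifs at h <;>
      simp only [Prod.mk.injEq] at h <;> tauto
  · rintro (⟨rfl, rfl⟩ | ⟨rfl, rfl⟩)
    · rfl
    · exact pvNorm_comm a b

theorem pvLenAdd {α : Type} [BEq α] [LawfulBEq α] (s : PySem.Set α) (x : α) :
    ((PySem.Set.add s x).length : Int) =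
      if x ∈ s then (s.length : Int) else (s.length : Int) + 1 := by
  rw [PySem.Set.add_eq_ite]; split_ifs <;> simp

theorem pvStepA_eq (q : List (Int × Int)) (d : Int) (x y : Int)
    (h : PySem.List.pyGet? q (-1) = some (x, y)) :
    pvStepA q d =
      q ++ [(x + ((PySem.List.pyGet? pvDp d).getD (0, 0)).1,
             y + ((PySem.List.pyGet? pvDp d).getD (0, 0)).2),
            (x + ((PySem.List.pyGet? pvDp d).getD (0, 0)).1 + ((PySem.List.pyGet? pvDp d).getD (0, 0)).1,
             y + ((PySem.List.pyGet? pvDp d).getD (0, 0)).2 + ((PySem.List.pyGet? pvDp d).getD (0, 0)).2)] := by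
  simp [pvStepA, h, PySem.List.pyGet?_neg_one_append_singleton, List.append_assoc]

theorem pvBuild_eq_scan : ∀ (arrows : List Int) (q : List (Int × Int)) (x y : Int),
    PySem.List.pyGet? q (-1) = some (x, y) →
    arrows.foldl pvStepA q = q ++ pvScan (pvDeltas arrows) x y := by
  intro arrows
  induction arrows with
  | nil => intro q x y h; simp [pvDeltas, pvScan]
  | cons d rest ih =>
    intro q x y h
    rw [List.foldl_cons, pvStepA_eq q d x y h]
    set dd := (PySem.List.pyGet? pvDp d).getD (0, 0) with hdd
    -- last of q ++ [p1, p2] is p2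
    have hlast : PySem.List.pyGet?
        (q ++ [(x + dd.1, y + dd.2), (x + dd.1 + dd.1, y + dd.2 + dd.2)]) (-1) =
        some (x + dd.1 + dd.1, y + dd.2 + dd.2) := by
      rw [show q ++ [(x + dd.1, y + dd.2), (x + dd.1 + dd.1, y + dd.2 + dd.2)] =
          (q ++ [(x + dd.1, y + dd.2)]) ++ [(x + dd.1 + dd.1, y + dd.2 + dd.2)] by simp]
      exact PySem.List.pyGet?_neg_one_append_singleton _ _
    rw [ih _ _ _ hlast]
    simp [pvDeltas, pvScan, List.append_assoc, ← hdd]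

theorem pvBuildA_eq_pts (arrows : List Int) : pvBuildA arrows = pvPts arrows := by
  unfold pvBuildA pvPts
  have := pvBuild_eq_scan arrows [(0, 0)] 0 0 (by decide)
  simpa using this

-- the walk invariant: A's count stays equal to |E| - |V| + 1 along the walk
theorem pvWalk (rest : List (Int × Int)) :
    ∀ (V : PySem.Set (Int × Int)) (F : PySem.Dict (Int × Int) (PySem.Set (Int × Int)))
      (c : Int) (prev : Int × Int) (E : PySem.Set ((Int × Int) × (Int × Int))),
    prev ∈ V →
    (∀ a b : Int × Int, a ∈ F.getD b PySem.Set.empty ↔ b ∈ F.getD a PySem.Set.empty) →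
    (∀ a b : Int × Int, pvNorm a b ∈ E ↔ a ∈ F.getD b PySem.Set.empty) →
    (∀ a b : Int × Int, pvNorm a b ∈ E → a ∈ V ∧ b ∈ V) →
    V.Nodup → E.Nodup →
    c = (E.length : Int) - (V.length : Int) + 1 →
    pvLoopA rest V F c prev =
      ((pvEdgeFold E prev rest).length : Int) - ((PySem.Set.update V rest).length : Int) + 1 := by
  induction rest with
  | nil =>
    intro V F c prev E _ _ _ _ _ _ hc
    simpa [pvLoopA, pvEdgeFold, PySem.Set.update] using hc
  | cons curr r ih =>
    intro V F c prev E hprev hsym hEF hend hVnd hEnd hc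
    -- the two inserts add the undirected edge {prev, curr} to the neighbour map
    have hnb : ∀ a b : Int × Int,
        a ∈ ((F.insert curr (PySem.Set.add (F.getD curr PySem.Set.empty) prev)).insert prev
          (PySem.Set.add ((F.insert curr (PySem.Set.add (F.getD curr PySem.Set.empty) prev)).getD
            prev PySem.Set.empty) curr)).getD b PySem.Set.empty ↔
        (a ∈ F.getD b PySem.Set.empty ∨ (b = curr ∧ a = prev) ∨ (b = prev ∧ a = curr)) := by
      intro a b
      simp only [PySem.Dict.getD_insert]
      split_ifs <;> subst_vars <;> (try simp only [PySem.Set.mem_add]) <;> tauto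
    have hEF' : ∀ a b : Int × Int,
        pvNorm a b ∈ PySem.Set.add E (pvNorm prev curr) ↔
        a ∈ ((F.insert curr (PySem.Set.add (F.getD curr PySem.Set.empty) prev)).insert prev
          (PySem.Set.add ((F.insert curr (PySem.Set.add (F.getD curr PySem.Set.empty) prev)).getD
            prev PySem.Set.empty) curr)).getD b PySem.Set.empty := by
      intro a b
      rw [PySem.Set.mem_add, hnb, pvNorm_inj, hEF]
      constructor
      · rintro (h | (⟨rfl, rfl⟩ | ⟨rfl, rfl⟩)) <;> tauto
      · rintro (h | ⟨rfl, rfl⟩ | ⟨rfl, rfl⟩) <;> tauto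
    have hsym' : ∀ a b : Int × Int,
        a ∈ ((F.insert curr (PySem.Set.add (F.getD curr PySem.Set.empty) prev)).insert prev
          (PySem.Set.add ((F.insert curr (PySem.Set.add (F.getD curr PySem.Set.empty) prev)).getD
            prev PySem.Set.empty) curr)).getD b PySem.Set.empty ↔
        b ∈ ((F.insert curr (PySem.Set.add (F.getD curr PySem.Set.empty) prev)).insert prev
          (PySem.Set.add ((F.insert curr (PySem.Set.add (F.getD curr PySem.Set.empty) prev)).getD
            prev PySem.Set.empty) curr)).getD a PySem.Set.empty := by
      intro a b; rw [hnb, hnb, hsym]; tauto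
    have hend' : ∀ a b : Int × Int,
        pvNorm a b ∈ PySem.Set.add E (pvNorm prev curr) →
        a ∈ PySem.Set.add V curr ∧ b ∈ PySem.Set.add V curr := by
      intro a b h
      rw [PySem.Set.mem_add] at h
      rcases h with h | h
      · exact ⟨(PySem.Set.mem_add _ _ _).mpr (Or.inl (hend a b h).1),
               (PySem.Set.mem_add _ _ _).mpr (Or.inl (hend a b h).2)⟩
      · rcases (pvNorm_inj a b prev curr).mp h with ⟨rfl, rfl⟩ | ⟨rfl, rfl⟩
        · exact ⟨(PySem.Set.mem_add _ _ _).mpr (Or.inl hprev), (PySem.Set.mem_add _ _ _).mpr (Or.inr rfl)⟩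
        · exact ⟨(PySem.Set.mem_add _ _ _).mpr (Or.inr rfl), (PySem.Set.mem_add _ _ _).mpr (Or.inl hprev)⟩
    have hvis : (if curr ∈ V then V else PySem.Set.add V curr) = PySem.Set.add V curr := by
      split_ifs with h
      · exact (PySem.Set.add_of_mem h).symm
      · rfl
    have hcnt : (if curr ∈ V then
          (if prev ∈ F.getD curr PySem.Set.empty then c else c + 1) else c) =
        ((PySem.Set.add E (pvNorm prev curr)).length : Int) -
          ((PySem.Set.add V curr).length : Int) + 1 := by
      rw [pvLenAdd, pvLenAdd]
      have hmem := hEF prev curr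
      by_cases hcv : curr ∈ V
      · by_cases hpm : prev ∈ F.getD curr PySem.Set.empty
        · simp only [hcv, hpm, hmem.mpr hpm, if_true]; omega
        · have hne : pvNorm prev curr ∉ E := fun hx => hpm (hmem.mp hx)
          simp only [hcv, hpm, hne, if_true, if_false]; omega
      · have hne : pvNorm prev curr ∉ E := fun hx => hcv (hend prev curr hx).2
        simp only [hcv, hne, if_false]; omega
    simp only [pvLoopA, pvEdgeFold, PySem.Set.update_cons, hvis]
    rw [hcnt]
    exact ih (PySem.Set.add V curr) _ _ curr (PySem.Set.add E (pvNorm prev curr))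
      ((PySem.Set.mem_add _ _ _).mpr (Or.inr rfl)) hsym' hEF' hend'
      (PySem.Set.nodup_add _ _ hVnd) (PySem.Set.nodup_add _ _ hEnd) rfl

-- ===== VERDICT (by name: the statement is the Claim_ definition above) =====
theorem solution_spec : Claim_equal_solution := by
  intro arrows _ _
  unfold Spec_solution solution solution_alt
  rw [pvBuildA_eq_pts]
  unfold pvPts pvEdgeSet
  simp only [List.tail_cons, PySem.Set.len_eq]
  rw [pvEdgeSet_eq_fold, PySem.Set.ofList_eq_foldl, List.foldl_cons,
    ← PySem.Set.update_eq_foldl]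
  exact pvWalk _ (PySem.Set.add PySem.Set.empty (0, 0)) PySem.Dict.empty 0 (0, 0)
    PySem.Set.empty (by decide)
    (by intro a b; simp [PySem.Dict.getD_empty, PySem.Set.empty])
    (by intro a b; simp [PySem.Dict.getD_empty, PySem.Set.empty])
    (by intro a b h; simp [PySem.Set.empty] at h)
    (by decide) (by decide) (by decide)
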